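-- pv_equiv track=rewrite | github.com/202520030411/Research_Agent_RL | data/sft_dataset.py | compute_observation_char_spans
-- ===== SOURCE A (Python) =====
-- def compute_observation_char_spans(
--     assistant_content: str,
--     asst_start_in_full: int,
-- ) -> list[tuple[int, int]]:
--     """
--     Return char spans [start, end) in the FULL chat string that fall inside
--     Observation: lines (including the "Observation: " prefix itself) -- these
--     tokens will be masked from the loss.
--
--     `asst_start_in_full` is the char index where assistant content begins
--     inside the full chat string.
--     """
--     spans = []
--     offset = 0
--     for line in assistant_content.split("\n"):
--         if line.startswith("Observation:"):
--             start = asst_start_in_full + offset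
--             end = start + len(line)
--             spans.append((start, end))
--         offset += len(line) + 1  # +1 for the '\n' separator
--     return spans
-- ===== SOURCE B (Python) =====
-- import re
--
-- _OBS_LINE = re.compile(r"^Observation:[^\n]*", re.MULTILINE)
--
-- def compute_observation_char_spans(
--     assistant_content: str,
--     asst_start_in_full: int,
-- ) -> list:
--     """Regex-based: let MULTILINE ^ locate line starts and [^\n]* the line end."""
--     return [
--         (asst_start_in_full + m.start(), asst_start_in_full + m.end())
--         for m in _OBS_LINE.finditer(assistant_content)
--     ]
-- ===== Notes on version B (the rewrite author's own statement) =====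
-- stated objective: idiomatic
-- what changed: Replaces the split('\n') loop with a running character-offset accumulator by a single precompiled re.finditer of ^Observation:[^\n]* in MULTILINE mode, reading each span directly off the match object.
import Mathlib
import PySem

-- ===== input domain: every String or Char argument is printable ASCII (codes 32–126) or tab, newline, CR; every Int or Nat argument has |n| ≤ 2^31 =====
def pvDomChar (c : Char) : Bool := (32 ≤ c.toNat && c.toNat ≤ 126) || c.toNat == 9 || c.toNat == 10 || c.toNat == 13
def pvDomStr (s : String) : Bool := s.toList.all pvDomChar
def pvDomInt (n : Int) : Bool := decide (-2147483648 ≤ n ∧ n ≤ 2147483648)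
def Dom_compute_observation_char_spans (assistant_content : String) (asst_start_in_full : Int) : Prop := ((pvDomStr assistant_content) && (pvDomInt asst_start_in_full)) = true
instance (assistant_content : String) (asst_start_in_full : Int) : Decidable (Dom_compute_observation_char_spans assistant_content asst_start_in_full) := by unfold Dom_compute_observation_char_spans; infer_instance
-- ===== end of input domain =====

-- B replaces A's split("\n") + running offset with a regex scan (re.finditer of
-- ^Observation:[^\n]* in MULTILINE mode), more idiomatic; return values are proved equal.

-- ===== PORT A =====
-- A: split on "\n", fold over the lines keeping (spans, offset).
def compute_observation_char_spans (assistant_content : String) (asst_start_in_full : Int) : List (Int × Int) :=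
  ((PySem.Chars.splitOn assistant_content.toList ['\n']).foldl
    (fun (st : List (Int × Int) × Int) line =>
      let st1 :=
        if PySem.Chars.startswith line "Observation:".toList then
          st.1 ++ [(asst_start_in_full + st.2, asst_start_in_full + st.2 + (line.length : Int))]
        else st.1
      (st1, st.2 + (line.length : Int) + 1))
    (([], 0) : List (Int × Int) × Int)).1

-- ===== PORT B =====
-- Hand port of re.finditer(r"^Observation:[^\n]*", s, re.MULTILINE): the regex matches at
-- each line start (position 0 and each position after a '\n') where the literal
-- "Observation:" is a prefix, and [^\n]* greedily extends the match to the end of that line.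
-- This recursion visits exactly the line starts in order and is exact for that pattern.
def pvAltGo (pos : Int) (cs : List Char) : List (Int × Int) :=
  let line := cs.takeWhile (fun c => c ≠ '\n')
  let rest := cs.dropWhile (fun c => c ≠ '\n')
  let here :=
    if PySem.Chars.startswith cs "Observation:".toList then
      [(pos, pos + (line.length : Int))]
    else []
  here ++ (if h : rest.isEmpty then [] else pvAltGo (pos + (line.length : Int) + 1) rest.tail)
termination_by cs.length
decreasing_by
  have hsuf : cs.dropWhile (fun c => c ≠ '\n') <:+ cs := List.dropWhile_suffix _
  have hle := hsuf.length_le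
  have hne : cs.dropWhile (fun c => c ≠ '\n') ≠ [] := fun he => h (List.isEmpty_iff.mpr he)
  have : 0 < (cs.dropWhile (fun c => c ≠ '\n')).length := List.length_pos_iff.mpr hne
  simp only [List.length_tail]
  omega

def compute_observation_char_spans_alt (assistant_content : String) (asst_start_in_full : Int) : List (Int × Int) :=
  pvAltGo asst_start_in_full assistant_content.toList

-- ===== PRECONDITION & SPEC =====
def Spec_compute_observation_char_spans (assistant_content : String) (asst_start_in_full : Int) (out : List (Int × Int)) : Prop := out = compute_observation_char_spans_alt assistant_content asst_start_in_full
instance (assistant_content : String) (asst_start_in_full : Int) (out : List (Int × Int)) : Decidable (Spec_compute_observation_char_spans assistant_content asst_start_in_full out) := by unfold Spec_compute_observation_char_spans; infer_instance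

-- ===== CLAIM (what is proved, stated in full; the proofs are below) =====
def Claim_equal_compute_observation_char_spans : Prop := ∀ (assistant_content : String) (asst_start_in_full : Int), Dom_compute_observation_char_spans assistant_content asst_start_in_full → Spec_compute_observation_char_spans assistant_content asst_start_in_full (compute_observation_char_spans assistant_content asst_start_in_full)

-- ===== LEMMAS AND PROOFS =====

-- Simple structural recursion equal to splitOn · ['\n'].
def pvSplitNl : List Char → List (List Char)
  | [] => [[]]
  | c :: cs =>
    if c = '\n' then [] :: pvSplitNl cs
    else
      match pvSplitNl cs with
      | [] => [[c]]
      | l :: ls => (c :: l) :: ls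

lemma pvSplitNl_ne_nil (cs : List Char) : pvSplitNl cs ≠ [] := by
  cases cs with
  | nil => simp [pvSplitNl]
  | cons c cs =>
    simp only [pvSplitNl]
    split
    · simp
    · cases h : pvSplitNl cs <;> simp

lemma splitOn_go_spec : ∀ (fuel : Nat) (l cur : List Char) (acc : List (List Char)),
    l.length + 1 ≤ fuel →
    PySem.Chars.splitOn.go ['\n'] fuel l cur acc =
      acc.reverse ++ (match pvSplitNl l with
        | [] => []
        | x :: xs => (cur.reverse ++ x) :: xs) := by
  intro fuel
  induction fuel with
  | zero => intro l cur acc h; omega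
  | succ n ih =>
    intro l cur acc h
    cases l with
    | nil => simp [PySem.Chars.splitOn.go, pvSplitNl]
    | cons c rest =>
      simp only [PySem.Chars.splitOn.go]
      by_cases hc : c = '\n'
      · subst hc
        have hpre : List.isPrefixOf ['\n'] ('\n' :: rest) = true := by
          simp [List.isPrefixOf]
        rw [if_pos hpre]
        have hd : List.drop (['\n'].length) ('\n' :: rest) = rest := rfl
        rw [hd, ih rest [] (cur.reverse :: acc) (by simp at h ⊢; omega)]
        have hne := pvSplitNl_ne_nil rest
        cases hr : pvSplitNl rest with
        | nil => exact absurd hr hne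
        | cons x xs => simp [pvSplitNl, hr]
      · have hpre : List.isPrefixOf ['\n'] (c :: rest) = false := by
          simp [List.isPrefixOf]
          intro hh; exact absurd hh.symm hc
        rw [if_neg (by simp [hpre])]
        rw [ih rest (c :: cur) acc (by simp at h ⊢; omega)]
        have hne := pvSplitNl_ne_nil rest
        cases hr : pvSplitNl rest with
        | nil => exact absurd hr hne
        | cons x xs => simp [pvSplitNl, hc, hr]

lemma splitOn_eq_pvSplitNl (cs : List Char) :
    PySem.Chars.splitOn cs ['\n'] = pvSplitNl cs := by
  unfold PySem.Chars.splitOn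
  rw [splitOn_go_spec (cs.length + 1) cs [] [] (le_refl _)]
  have hne := pvSplitNl_ne_nil cs
  cases hr : pvSplitNl cs with
  | nil => exact absurd hr hne
  | cons x xs => simp

-- Reference function: spans of a line list starting at absolute position p.
def pvSpansOf : List (List Char) → Int → List (Int × Int)
  | [], _ => []
  | line :: rest, p =>
    (if PySem.Chars.startswith line "Observation:".toList then
       [(p, p + (line.length : Int))]
     else []) ++ pvSpansOf rest (p + (line.length : Int) + 1)

lemma foldA_spec (i : Int) : ∀ (lines : List (List Char)) (acc : List (Int × Int)) (off : Int),
    (lines.foldl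
      (fun (st : List (Int × Int) × Int) line =>
        let st1 :=
          if PySem.Chars.startswith line "Observation:".toList then
            st.1 ++ [(i + st.2, i + st.2 + (line.length : Int))]
          else st.1
        (st1, st.2 + (line.length : Int) + 1)) (acc, off)).1
      = acc ++ pvSpansOf lines (i + off) := by
  intro lines
  induction lines with
  | nil => intro acc off; simp [pvSpansOf]
  | cons line rest ih =>
    intro acc off
    simp only [List.foldl]
    rw [ih]
    have hoff : i + (off + (line.length : Int) + 1) = i + off + (line.length : Int) + 1 := by
      ring
    by_cases hsw : PySem.Chars.startswith line "Observation:".toList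
    · simp only [pvSpansOf, hsw]
      simp [hoff]
    · simp only [pvSpansOf, hsw]
      simp [hoff]

lemma isPrefixOf_takeWhile (obs : List Char) (h : '\n' ∉ obs) :
    ∀ cs : List Char,
      List.isPrefixOf obs (cs.takeWhile (fun c => c ≠ '\n')) = List.isPrefixOf obs cs := by
  induction obs with
  | nil => intro cs; simp [List.isPrefixOf]
  | cons o os ih =>
    intro cs
    have ho : o ≠ '\n' := by intro hh; exact h (by simp [hh])
    have hos : '\n' ∉ os := by intro hh; exact h (by simp [hh])
    cases cs with
    | nil => simp
    | cons c cs' =>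
      by_cases hc : c = '\n'
      · subst hc
        simp [List.takeWhile, List.isPrefixOf]
        intro hoe; exact absurd hoe ho
      · have h2 := ih hos cs'
        simp only [ne_eq, decide_not] at h2
        simp [List.takeWhile, hc, List.isPrefixOf, h2]

lemma pvSplitNl_decomp (cs : List Char) :
    pvSplitNl cs = cs.takeWhile (fun c => c ≠ '\n') ::
      (match cs.dropWhile (fun c => c ≠ '\n') with
        | [] => []
        | _ :: r => pvSplitNl r) := by
  induction cs with
  | nil => simp [pvSplitNl]
  | cons c cs ih =>
    by_cases hc : c = '\n'
    · subst hc; simp [pvSplitNl, List.takeWhile, List.dropWhile]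
    · simp only [pvSplitNl, List.takeWhile, List.dropWhile, hc]
      rw [ih]
      simp [hc]

lemma pvAltGo_spec : ∀ (n : Nat) (cs : List Char), cs.length ≤ n →
    ∀ pos : Int, pvAltGo pos cs = pvSpansOf (pvSplitNl cs) pos := by
  intro n
  induction n with
  | zero =>
    intro cs hcs pos
    have : cs = [] := List.length_eq_zero_iff.mp (Nat.le_zero.mp hcs)
    subst this
    rw [pvAltGo]
    simp [pvSplitNl, pvSpansOf, PySem.Chars.startswith]
  | succ n ih =>
    intro cs hcs pos
    rw [pvAltGo, pvSplitNl_decomp cs]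
    have hsw : PySem.Chars.startswith (cs.takeWhile (fun c => c ≠ '\n')) "Observation:".toList
        = PySem.Chars.startswith cs "Observation:".toList := by
      unfold PySem.Chars.startswith
      exact isPrefixOf_takeWhile _ (by decide) cs
    cases hr : cs.dropWhile (fun c => c ≠ '\n') with
    | nil =>
      rw [dif_pos (by rfl)]
      simp only [pvSpansOf, hsw, List.append_nil]
    | cons d r =>
      have hsuf : cs.dropWhile (fun c => c ≠ '\n') <:+ cs := List.dropWhile_suffix _
      have hlen : r.length ≤ n := by
        have := hsuf.length_le
        rw [hr] at this; simp at this; omega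
      rw [dif_neg (by simp)]
      simp only [List.tail_cons]
      rw [ih r hlen]
      simp only [pvSpansOf, hsw]

-- ===== VERDICT (by name: the statement is the Claim_ definition above) =====
theorem compute_observation_char_spans_spec : Claim_equal_compute_observation_char_spans := by
  intro s i _
  unfold Spec_compute_observation_char_spans
  unfold compute_observation_char_spans compute_observation_char_spans_alt
  rw [splitOn_eq_pvSplitNl, foldA_spec i _ [] 0,
      pvAltGo_spec s.toList.length s.toList (le_refl _) i]
  simp
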